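-- pv_equiv track=rewrite | github.com/SungsooKwon/Coding_study | 프로그래머스/1/42862. 체육복/체육복.py | solution
-- ===== SOURCE A (Python) =====
-- def solution(n, lost, reserve):
--
--     lost_set = set(lost) - set(reserve)
--     reserve_set = set(reserve) - set(lost)
--
--     # 초기 체육 수업 가능 인원
--     answer = n - len(lost_set)
--
--     # 체육복 빌려주기
--     for l in sorted(lost_set): # 정렬해서 앞번호 먼저 체크
--         if l - 1 in reserve_set: # 앞 번호 학생이 여벌을 가지고 있으면
--             reserve_set.remove(l - 1)
--             answer += 1
--         elif l + 1 in reserve_set: # 뒷 번호 학생이 여벌을 가지고 있으면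
--             reserve_set.remove(l + 1)
--             answer += 1
--
--     return answer
-- ===== SOURCE B (Python) =====
-- def solution(n, lost, reserve):
--     L = sorted(set(lost) - set(reserve))
--     R = sorted(set(reserve) - set(lost))
--     i = j = matched = 0
--     while i < len(L) and j < len(R):
--         if R[j] < L[i] - 1:
--             j += 1
--         elif R[j] <= L[i] + 1:
--             matched += 1
--             i += 1
--             j += 1
--         else:
--             i += 1
--     return n - len(L) + matched
-- ===== Notes on version B (the rewrite author's own statement) =====
-- stated objective: alternative
-- what changed: Replaces A's per-lost-student membership tests and destructive removals on a reserve set by a single two-pointer merge over both sorted lists, counting matches without mutating any set.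
import Mathlib
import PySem

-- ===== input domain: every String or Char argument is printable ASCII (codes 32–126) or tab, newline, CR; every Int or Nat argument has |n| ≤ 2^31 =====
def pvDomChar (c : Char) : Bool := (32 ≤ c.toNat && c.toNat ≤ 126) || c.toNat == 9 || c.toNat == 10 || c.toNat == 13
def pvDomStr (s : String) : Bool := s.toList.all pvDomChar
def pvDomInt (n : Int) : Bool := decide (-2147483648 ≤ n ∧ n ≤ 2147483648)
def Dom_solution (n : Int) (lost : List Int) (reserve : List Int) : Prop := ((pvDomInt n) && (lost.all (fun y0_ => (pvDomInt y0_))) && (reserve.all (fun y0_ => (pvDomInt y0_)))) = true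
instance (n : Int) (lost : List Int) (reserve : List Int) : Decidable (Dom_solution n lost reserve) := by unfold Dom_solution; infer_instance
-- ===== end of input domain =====

-- B replaces A's per-lost membership tests + destructive set removals by a single
-- two-pointer merge over both sorted lists (alternative algorithm, same cost class).


-- ===== PORT A =====
-- the 'for l in sorted(lost_set)' loop; 'reserve_set.remove(x)' runs only under the
-- membership guard, where it is exactly Set.discard (PySem.Set.remove?_of_mem)
def loopA : List Int → PySem.Set Int → Int → Int
  | [], _, answer => answer
  | l :: ls, rset, answer =>
    if rset.contains (l - 1) then
      loopA ls (rset.discard (l - 1)) (answer + 1)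
    else if rset.contains (l + 1) then
      loopA ls (rset.discard (l + 1)) (answer + 1)
    else
      loopA ls rset answer

def solution (n : Int) (lost : List Int) (reserve : List Int) : Int :=
  let lostSet := PySem.Set.diff (PySem.Set.ofList lost) (PySem.Set.ofList reserve)
  let reserveSet := PySem.Set.diff (PySem.Set.ofList reserve) (PySem.Set.ofList lost)
  let answer := n - PySem.Set.len lostSet
  loopA (PySem.List.sorted lostSet (fun x => x) false) reserveSet answer

-- ===== PORT B =====
-- the two-pointer while-loop of Source B, as structural recursion on the two suffixes
def tp : List Int → List Int → Int
  | [], _ => 0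
  | _ :: _, [] => 0
  | l :: ls, r :: rs =>
    if r < l - 1 then tp (l :: ls) rs
    else if r ≤ l + 1 then 1 + tp ls rs
    else tp ls (r :: rs)
termination_by ls rs => ls.length + rs.length

def solution_alt (n : Int) (lost : List Int) (reserve : List Int) : Int :=
  let L := PySem.List.sorted (PySem.Set.diff (PySem.Set.ofList lost) (PySem.Set.ofList reserve)) (fun x => x) false
  let R := PySem.List.sorted (PySem.Set.diff (PySem.Set.ofList reserve) (PySem.Set.ofList lost)) (fun x => x) false
  n - (L.length : Int) + tp L R

-- ===== PRECONDITION & SPEC =====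
def Spec_solution (n : Int) (lost : List Int) (reserve : List Int) (out : Int) : Prop := out = solution_alt n lost reserve
instance (n : Int) (lost : List Int) (reserve : List Int) (out : Int) : Decidable (Spec_solution n lost reserve out) := by unfold Spec_solution; infer_instance

-- ===== CLAIM (what is proved, stated in full; the proofs are below) =====
def Claim_equal_solution : Prop := ∀ (n : Int) (lost : List Int) (reserve : List Int), Dom_solution n lost reserve → Spec_solution n lost reserve (solution n lost reserve)

-- ===== LEMMAS AND PROOFS =====

-- loopA only reads membership and filters: it is invariant under permutation of the set
lemma loopA_perm (ls : List Int) (R R' : PySem.Set Int) (acc : Int)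
    (h : R.Perm R') : loopA ls R acc = loopA ls R' acc := by
  induction ls generalizing R R' acc with
  | nil => rfl
  | cons l ls ih =>
    have hc : ∀ x : Int, R.contains x = R'.contains x := by
      intro x
      rw [Bool.eq_iff_iff]
      simp only [PySem.Set.contains_iff]
      exact h.mem_iff
    simp only [loopA, hc]
    split_ifs with h1 h2
    · exact ih _ _ _ (h.filter _)
    · exact ih _ _ _ (h.filter _)
    · exact ih _ _ _ h

-- a reserve id irrelevant to every remaining lost id can be dropped from the set
lemma loopA_drop (ls : List Int) (r : Int) (rs : PySem.Set Int) (acc : Int)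
    (h : ∀ l ∈ ls, r ≠ l - 1 ∧ r ≠ l + 1) :
    loopA ls (r :: rs) acc = loopA ls rs acc := by
  induction ls generalizing rs acc with
  | nil => rfl
  | cons l ls ih =>
    have h1 := h l (by simp)
    have hne1 : ((l - 1 : Int) == r) = false := by
      simp only [beq_eq_false_iff_ne]; omega
    have hne2 : ((l + 1 : Int) == r) = false := by
      simp only [beq_eq_false_iff_ne]; omega
    have hd1 : PySem.Set.discard (r :: rs) (l - 1) = r :: PySem.Set.discard rs (l - 1) := by
      simp only [PySem.Set.discard, List.filter_cons]
      rw [show ((r == (l - 1 : Int))) = false by simp only [beq_eq_false_iff_ne]; omega]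
      rfl
    have hd2 : PySem.Set.discard (r :: rs) (l + 1) = r :: PySem.Set.discard rs (l + 1) := by
      simp only [PySem.Set.discard, List.filter_cons]
      rw [show ((r == (l + 1 : Int))) = false by simp only [beq_eq_false_iff_ne]; omega]
      rfl
    have hcont : ∀ x : Int, (x == r) = false → PySem.Set.contains (r :: rs) x = PySem.Set.contains rs x := by
      intro x hx
      simp only [PySem.Set.contains, List.contains_cons, hx, Bool.false_or]
    simp only [loopA, hcont _ hne1, hcont _ hne2, hd1, hd2]
    split_ifs with g1 g2
    · exact ih _ _ (fun l' hl' => h l' (by simp [hl']))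
    · exact ih _ _ (fun l' hl' => h l' (by simp [hl']))
    · exact ih _ _ (fun l' hl' => h l' (by simp [hl']))

lemma contains_eq_false_of_forall_ne (rs : List Int) (x : Int)
    (h : ∀ y ∈ rs, x ≠ y) : PySem.Set.contains rs x = false := by
  rw [← Bool.not_eq_true]
  intro hc
  exact h x ((PySem.Set.contains_iff _ _).mp hc) rfl

-- head removal on a strictly sorted list
lemma discard_head (r : Int) (rs : List Int)
    (hrs : (r :: rs).Pairwise (· < ·)) :
    PySem.Set.discard (r :: rs) r = rs := by
  rw [show PySem.Set.discard (r :: rs) r = List.filter (fun y => !y == r) rs from by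
    simp [PySem.Set.discard]]
  rw [List.filter_eq_self.mpr]
  intro x hx
  have hxr := (List.pairwise_cons.mp hrs).1 x hx
  simp only [Bool.not_eq_true', beq_eq_false_iff_ne]
  omega

-- core equivalence: A's greedy over the sorted lost list with set removal
-- computes exactly the two-pointer match count plus the accumulator
lemma loopA_eq_tp (ls rs : List Int) :
    ∀ acc : Int, ls.Pairwise (· < ·) → rs.Pairwise (· < ·) → (∀ x ∈ ls, x ∉ rs) →
      loopA ls rs acc = acc + tp ls rs := by
  induction ls, rs using tp.induct with
  | case1 rs =>
    intro acc _ _ _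
    simp [loopA, tp]
  | case2 l ls =>
    intro acc hls _ _
    have : ∀ ls' : List Int, loopA ls' [] acc = acc := by
      intro ls'
      induction ls' with
      | nil => rfl
      | cons a as ih => simp [loopA, PySem.Set.contains, ih]
    simp [tp, this]
  | case3 l ls r rs hr ih =>
    -- r < l - 1 : drop r on both sides
    intro acc hls hrs hd
    have hdrop : loopA (l :: ls) (r :: rs) acc = loopA (l :: ls) rs acc := by
      apply loopA_drop
      intro l' hl'
      rcases List.mem_cons.mp hl' with h | h
      · subst h; omega
      · have := (List.pairwise_cons.mp hls).1 l' h
        omega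
    rw [hdrop, ih acc hls (List.Pairwise.of_cons hrs)
      (fun x hx hmem => hd x hx (List.mem_cons_of_mem _ hmem))]
    rw [tp]
    simp [hr]
  | case4 l ls r rs hr hr2 ih =>
    -- l - 1 ≤ r ≤ l + 1 and r ≠ l : a match
    intro acc hls hrs hd
    have hrl : r ≠ l := fun h => hd l (by simp) (by simp [h.symm])
    have hrsgt : ∀ y ∈ rs, r < y := (List.pairwise_cons.mp hrs).1
    rcases (by omega : r = l - 1 ∨ r = l + 1) with h | h
    · -- r = l - 1, the head matches as the "l-1" branch
      have hc : PySem.Set.contains (r :: rs) (l - 1) = true := by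
        apply (PySem.Set.contains_iff _ _).mpr; simp [h]
      have hdis : PySem.Set.discard (r :: rs) (l - 1) = rs := by
        rw [← h]; exact discard_head r rs hrs
      rw [loopA, if_pos hc, hdis,
        ih (acc + 1) (List.Pairwise.of_cons hls) (List.Pairwise.of_cons hrs)
          (fun x hx hmem => hd x (List.mem_cons_of_mem _ hx) (List.mem_cons_of_mem _ hmem))]
      rw [tp]
      simp only [if_neg (by omega : ¬ r < l - 1), if_pos hr2]
      omega
    · -- r = l + 1 : l - 1 is below every element of r :: rs
      have hc1 : PySem.Set.contains (r :: rs) (l - 1) = false := by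
        apply contains_eq_false_of_forall_ne
        intro y hy
        rcases List.mem_cons.mp hy with hyr | hyr
        · omega
        · have := hrsgt y hyr; omega
      have hc2 : PySem.Set.contains (r :: rs) (l + 1) = true := by
        apply (PySem.Set.contains_iff _ _).mpr; simp [h]
      have hdis : PySem.Set.discard (r :: rs) (l + 1) = rs := by
        rw [← h]; exact discard_head r rs hrs
      rw [loopA, if_neg (by rw [hc1]; simp), if_pos hc2, hdis,
        ih (acc + 1) (List.Pairwise.of_cons hls) (List.Pairwise.of_cons hrs)
          (fun x hx hmem => hd x (List.mem_cons_of_mem _ hx) (List.mem_cons_of_mem _ hmem))]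
      rw [tp]
      simp only [if_neg (by omega : ¬ r < l - 1), if_pos hr2]
      omega
  | case5 l ls r rs hr hr2 ih =>
    -- l + 1 < r : l cannot be served
    intro acc hls hrs hd
    have hrsgt : ∀ y ∈ rs, r < y := (List.pairwise_cons.mp hrs).1
    have hc1 : PySem.Set.contains (r :: rs) (l - 1) = false := by
      apply contains_eq_false_of_forall_ne
      intro y hy
      rcases List.mem_cons.mp hy with hyr | hyr
      · omega
      · have := hrsgt y hyr; omega
    have hc2 : PySem.Set.contains (r :: rs) (l + 1) = false := by
      apply contains_eq_false_of_forall_ne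
      intro y hy
      rcases List.mem_cons.mp hy with hyr | hyr
      · omega
      · have := hrsgt y hyr; omega
    rw [loopA, if_neg (by rw [hc1]; simp), if_neg (by rw [hc2]; simp),
      ih acc (List.Pairwise.of_cons hls) hrs
        (fun x hx hmem => hd x (List.mem_cons_of_mem _ hx) hmem)]
    rw [tp]
    simp only [if_neg (by omega : ¬ r < l - 1), if_neg (by omega : ¬ r ≤ l + 1)]

-- sorting a duplicate-free list by the identity key gives a strictly increasing list
lemma sorted_pairwise_lt_of_nodup (xs : List Int) (h : xs.Nodup) :
    (PySem.List.sorted xs (fun x => x) false).Pairwise (· < ·) := by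
  have h1 : (PySem.List.sorted xs (fun x => x) false).Pairwise (· ≤ ·) := by
    have := PySem.List.sorted_pairwise xs (fun x => x)
    simpa using this
  have h2 : (PySem.List.sorted xs (fun x => x) false).Nodup :=
    (PySem.List.sorted_perm xs (fun x => x) false).nodup_iff.mpr h
  have := h1.and h2
  exact this.imp (fun h => by
    obtain ⟨hle, hne⟩ := h
    omega)

-- ===== VERDICT (by name: the statement is the Claim_ definition above) =====
theorem solution_spec : Claim_equal_solution := by
  intro n lost reserve _
  unfold Spec_solution solution solution_alt
  have hLnodup : (PySem.Set.diff (PySem.Set.ofList lost) (PySem.Set.ofList reserve)).Nodup :=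
    PySem.Set.nodup_diff _ _ (PySem.Set.nodup_ofList lost)
  have hRnodup : (PySem.Set.diff (PySem.Set.ofList reserve) (PySem.Set.ofList lost)).Nodup :=
    PySem.Set.nodup_diff _ _ (PySem.Set.nodup_ofList reserve)
  set Lset := PySem.Set.diff (PySem.Set.ofList lost) (PySem.Set.ofList reserve) with hLset
  set Rset := PySem.Set.diff (PySem.Set.ofList reserve) (PySem.Set.ofList lost) with hRset
  set Ls := PySem.List.sorted Lset (fun x => x) false with hLs
  set Rs := PySem.List.sorted Rset (fun x => x) false with hRs
  have hperm : Rset.Perm Rs := (PySem.List.sorted_perm Rset (fun x => x) false).symm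
  have hdisj : ∀ x ∈ Ls, x ∉ Rs := by
    intro x hx hxR
    have hxL : x ∈ Lset := (PySem.List.sorted_perm Lset (fun x => x) false).mem_iff.mp hx
    have hxR' : x ∈ Rset := (PySem.List.sorted_perm Rset (fun x => x) false).mem_iff.mp hxR
    have h1 := ((PySem.Set.mem_diff _ _ _).mp hxL).2
    have h2 := ((PySem.Set.mem_diff _ _ _).mp hxR').1
    exact h1 h2
  rw [loopA_perm Ls Rset Rs _ hperm,
    loopA_eq_tp Ls Rs _ (sorted_pairwise_lt_of_nodup Lset hLnodup)
      (sorted_pairwise_lt_of_nodup Rset hRnodup) hdisj]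
  have hlen : (Ls.length : Int) = PySem.Set.len Lset := by
    rw [hLs, PySem.List.length_sorted]; rfl
  show n - PySem.Set.len Lset + tp Ls Rs = n - (Ls.length : Int) + tp Ls Rs
  rw [hlen]
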